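-- pv_equiv track=rewrite | github.com/kokizzu/Kyoo | transcoder/tests/hls_validation/hls_utils.py | _parse_attrs
-- ===== SOURCE A (Python) =====
-- def _parse_attrs(line: str) -> dict[str, str]:
--     _, payload = line.split(":", 1)
--     out: dict[str, str] = {}
--     current = ""
--     parts: list[str] = []
--     in_quotes = False
--     for ch in payload:
--         if ch == '"':
--             in_quotes = not in_quotes
--             current += ch
--             continue
--         if ch == "," and not in_quotes:
--             parts.append(current)
--             current = ""
--             continue
--         current += ch
--     if current:
--         parts.append(current)
--
--     for part in parts:
--         if "=" not in part:
--             continue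
--         k, v = part.split("=", 1)
--         out[k.strip()] = v.strip().strip('"')
--     return out
-- ===== SOURCE B (Python) =====
-- def _parse_attrs(line: str) -> dict[str, str]:
--     payload = line.split(":", 1)[1]
--     parts: list[str] = []
--     cur = ""
--     for i, seg in enumerate(payload.split('"')):
--         if i % 2:
--             cur += '"' + seg
--         else:
--             if i:
--                 cur += '"'
--             first, *rest = seg.split(",")
--             cur += first
--             for piece in rest:
--                 parts.append(cur)
--                 cur = piece
--     if cur:
--         parts.append(cur)
--     out: dict[str, str] = {}
--     for part in parts:
--         if "=" in part:
--             k, v = part.split("=", 1)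
--             out[k.strip()] = v.strip().strip('"')
--     return out
-- ===== Notes on version B (the rewrite author's own statement) =====
-- stated objective: alternative
-- what changed: Replaces A's per-character in_quotes state machine by splitting the payload on '"' and walking the segments: even segments (outside quotes) are split on commas, odd segments are re-quoted and appended whole; the second key=value loop is unchanged.
import Mathlib
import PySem

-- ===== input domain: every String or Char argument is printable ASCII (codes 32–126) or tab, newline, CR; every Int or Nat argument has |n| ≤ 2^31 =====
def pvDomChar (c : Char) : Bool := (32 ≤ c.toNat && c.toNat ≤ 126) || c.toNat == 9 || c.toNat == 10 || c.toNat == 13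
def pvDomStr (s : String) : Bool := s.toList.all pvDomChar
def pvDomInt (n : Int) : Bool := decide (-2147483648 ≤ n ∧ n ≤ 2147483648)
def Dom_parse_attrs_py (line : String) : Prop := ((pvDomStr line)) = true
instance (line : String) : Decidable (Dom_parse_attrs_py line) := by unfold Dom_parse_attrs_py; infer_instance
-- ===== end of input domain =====

-- B replaces A's per-character quote state machine by a split('"') segment walk (even
-- segments are outside quotes and get split on commas, odd segments are re-quoted whole);
-- objective: alternative decomposition, same cost. Equivalence is about the return value.

-- ===== PORT A =====
-- A's first loop: state = (parts, current, in_quotes), one step per character.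
def pvAStep (st : List (List Char) × List Char × Bool) (ch : Char) :
    List (List Char) × List Char × Bool :=
  if ch = '"' then (st.1, st.2.1 ++ [ch], !st.2.2)
  else if ch = ',' ∧ st.2.2 = false then (st.1 ++ [st.2.1], [], st.2.2)
  else (st.1, st.2.1 ++ [ch], st.2.2)

-- A's second loop: skip parts without '=', split on first '=', out[k.strip()] = v.strip().strip('"')
def pvEntryA (out : PySem.Dict String String) (part : List Char) : PySem.Dict String String :=
  if PySem.Chars.isIn ['='] part = false then out
  else
    match PySem.Chars.splitOnMax part ['='] 1 with
    | [k, v] =>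
        out.insert (String.ofList (PySem.Chars.strip k))
          (String.ofList (PySem.Chars.stripChars (PySem.Chars.strip v) ['"']))
    | _ => out  -- unreachable: '=' ∈ part gives exactly two pieces

def parse_attrs_py (line : String) : List (String × String) :=
  match PySem.Chars.splitOnMax line.toList [':'] 1 with  -- line.split(":", 1)
  | [_, payload] =>
      let st := payload.foldl pvAStep ([], [], false)
      let parts := if st.2.1 ≠ [] then st.1 ++ [st.2.1] else st.1
      (parts.foldl pvEntryA PySem.Dict.empty).items
  | _ => []  -- Python raises ValueError here (no ':'); excluded by Pre_

-- ===== PORT B =====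
-- inner loop 'for piece in rest: parts.append(cur); cur = piece'
def pvCommaFold (st : List (List Char) × List Char) (piece : List Char) :
    List (List Char) × List Char :=
  (st.1 ++ [st.2], piece)

-- one enumerated segment of payload.split('"')
def pvBSeg (st : List (List Char) × List Char) (iseg : Int × List Char) :
    List (List Char) × List Char :=
  if PySem.Int.mod iseg.1 2 ≠ 0 then (st.1, st.2 ++ '"' :: iseg.2)  -- if i % 2: cur += '"' + seg
  else
    let cur := if iseg.1 ≠ 0 then st.2 ++ ['"'] else st.2           -- if i: cur += '"'
    match PySem.Chars.splitOn iseg.2 [','] with                     -- first, *rest = seg.split(",")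
    | [] => (st.1, cur)  -- unreachable: split never returns []
    | first :: rest => rest.foldl pvCommaFold (st.1, cur ++ first)

-- B's second loop: 'if "=" in part:' then the same body as A's
def pvEntryB (out : PySem.Dict String String) (part : List Char) : PySem.Dict String String :=
  if PySem.Chars.isIn ['='] part = true then
    match PySem.Chars.splitOnMax part ['='] 1 with
    | [k, v] =>
        out.insert (String.ofList (PySem.Chars.strip k))
          (String.ofList (PySem.Chars.stripChars (PySem.Chars.strip v) ['"']))
    | _ => out
  else out

def parse_attrs_py_alt (line : String) : List (String × String) :=
  match PySem.List.pyGet? (PySem.Chars.splitOnMax line.toList [':'] 1) 1 with  -- line.split(":", 1)[1]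
  | none => []  -- Python raises IndexError here (no ':'); excluded by Pre_
  | some payload =>
      let st := (PySem.List.enumerate (PySem.Chars.splitOn payload ['"'])).foldl pvBSeg ([], [])
      let parts := if st.2 ≠ [] then st.1 ++ [st.2] else st.1
      (parts.foldl pvEntryB PySem.Dict.empty).items

-- ===== PRECONDITION & SPEC =====
-- A raises ValueError on lines without ':' (the two-target unpacking of split fails); B raises IndexError there.
def Pre_parse_attrs_py (line : String) : Prop := PySem.Str.isIn ":" line = true
instance (line : String) : Decidable (Pre_parse_attrs_py line) := by
  unfold Pre_parse_attrs_py; infer_instance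

def pvWitness_parse_attrs_py : String := "#EXT-X-MEDIA:TYPE=AUDIO,NAME=\"a,b\""

def Spec_parse_attrs_py (line : String) (out : List (String × String)) : Prop :=
  out = parse_attrs_py_alt line
instance (line : String) (out : List (String × String)) : Decidable (Spec_parse_attrs_py line out) := by
  unfold Spec_parse_attrs_py; infer_instance

-- ===== CLAIM (what is proved, stated in full; the proofs are below) =====
def Claim_equal_parse_attrs_py : Prop :=
  ∀ (line : String), Dom_parse_attrs_py line → Pre_parse_attrs_py line →
    Spec_parse_attrs_py line (parse_attrs_py line)

-- ===== LEMMAS AND PROOFS =====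

-- Simple recursions characterizing PySem's fuel-based splitters (single-char separator).
def pvConsHead (pre : List Char) : List (List Char) → List (List Char)
  | [] => [pre]
  | h :: t => (pre ++ h) :: t

def pvSplit1 (q : Char) : List Char → List (List Char)
  | [] => [[]]
  | c :: cs => if c = q then [[], cs] else pvConsHead [c] (pvSplit1 q cs)

def pvSplitAll (q : Char) : List Char → List (List Char)
  | [] => [[]]
  | c :: cs => if c = q then [] :: pvSplitAll q cs else pvConsHead [c] (pvSplitAll q cs)

theorem pvSplitAll_ne_nil (q : Char) (cs : List Char) : pvSplitAll q cs ≠ [] := by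
  cases cs with
  | nil => simp [pvSplitAll]
  | cons c cs =>
      simp only [pvSplitAll]
      split
      · simp
      · cases pvSplitAll q cs <;> simp [pvConsHead]

theorem pvConsHead_append (pre pre' : List Char) (ls : List (List Char)) :
    pvConsHead (pre ++ pre') ls = pvConsHead pre (pvConsHead pre' ls) := by
  cases ls <;> simp [pvConsHead]

theorem pv_isPrefixOf_single (q c : Char) (l : List Char) :
    [q].isPrefixOf (c :: l) = (c == q) := by
  simp [List.isPrefixOf, eq_comm]


theorem pv_goMax0 (q : Char) (fuel : Nat) (l cur : List Char) (acc : List (List Char)) :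
    PySem.Chars.splitOnMax.go [q] fuel 0 l cur acc = acc.reverse ++ [cur.reverse ++ l] := by
  cases fuel with
  | zero => simp [PySem.Chars.splitOnMax.go]
  | succ f => cases l <;> simp [PySem.Chars.splitOnMax.go]
theorem pv_goMax1 (q : Char) (l : List Char) :
    ∀ (fuel : Nat) (cur : List Char) (acc : List (List Char)), l.length ≤ fuel →
    PySem.Chars.splitOnMax.go [q] fuel 1 l cur acc
      = acc.reverse ++ pvConsHead cur.reverse (pvSplit1 q l) := by
  induction l with
  | nil =>
      intro fuel cur acc _
      cases fuel <;> simp [PySem.Chars.splitOnMax.go, pvSplit1, pvConsHead]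
  | cons c rest ih =>
      intro fuel cur acc hf
      cases fuel with
      | zero => simp at hf
      | succ f =>
          simp only [PySem.Chars.splitOnMax.go, pv_isPrefixOf_single]
          by_cases hc : c = q
          · simp only [hc, beq_self_eq_true, if_true, if_neg one_ne_zero, List.length_singleton,
              List.drop_succ_cons, List.drop_zero]
            rw [pv_goMax0]
            simp [pvSplit1, hc, pvConsHead]
          · have hcb : (c == q) = false := by simp [hc]
            simp only [hcb, Bool.false_eq_true, if_false, if_neg one_ne_zero]
            rw [ih f (c :: cur) acc (by simpa using Nat.le_of_succ_le_succ hf)]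
            have h1 : (c :: cur).reverse = cur.reverse ++ [c] := by simp
            rw [h1, pvConsHead_append]
            simp [pvSplit1, hc]

theorem pv_splitOnMax1 (q : Char) (cs : List Char) :
    PySem.Chars.splitOnMax cs [q] 1 = pvConsHead [] (pvSplit1 q cs) := by
  unfold PySem.Chars.splitOnMax
  rw [if_neg (by norm_num)]
  simp only [Int.toNat_one]
  rw [pv_goMax1 q cs (cs.length + 1) [] [] (by omega)]
  simp

theorem pv_goAll (q : Char) (l : List Char) :
    ∀ (fuel : Nat) (cur : List Char) (acc : List (List Char)), l.length ≤ fuel →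
    PySem.Chars.splitOn.go [q] fuel l cur acc
      = acc.reverse ++ pvConsHead cur.reverse (pvSplitAll q l) := by
  induction l with
  | nil =>
      intro fuel cur acc _
      cases fuel <;> simp [PySem.Chars.splitOn.go, pvSplitAll, pvConsHead]
  | cons c rest ih =>
      intro fuel cur acc hf
      cases fuel with
      | zero => simp at hf
      | succ f =>
          simp only [PySem.Chars.splitOn.go, pv_isPrefixOf_single]
          by_cases hc : c = q
          · simp only [hc, beq_self_eq_true, if_true, List.length_singleton,
              List.drop_succ_cons, List.drop_zero]
            rw [ih f [] (cur.reverse :: acc) (by simpa using Nat.le_of_succ_le_succ hf)]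
            cases h : pvSplitAll q rest with
            | nil => exact absurd h (pvSplitAll_ne_nil q rest)
            | cons s t => simp [pvSplitAll, hc, h, pvConsHead]
          · have hcb : (c == q) = false := by simp [hc]
            simp only [hcb, Bool.false_eq_true, if_false]
            rw [ih f (c :: cur) acc (by simpa using Nat.le_of_succ_le_succ hf)]
            have h1 : (c :: cur).reverse = cur.reverse ++ [c] := by simp
            rw [h1, pvConsHead_append]
            simp [pvSplitAll, hc]

theorem pv_splitOn (q : Char) (cs : List Char) :
    PySem.Chars.splitOn cs [q] = pvConsHead [] (pvSplitAll q cs) := by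
  unfold PySem.Chars.splitOn
  rw [pv_goAll q cs (cs.length + 1) [] [] (by omega)]
  simp

theorem pv_consHead_nil (ls : List (List Char)) (h : ls ≠ []) : pvConsHead [] ls = ls := by
  cases ls with
  | nil => exact absurd rfl h
  | cons a t => simp [pvConsHead]

-- pvSplitAll: no separator inside any segment, and recomposition.
theorem pvSplitAll_free (q : Char) (cs : List Char) :
    ∀ seg ∈ pvSplitAll q cs, q ∉ seg := by
  induction cs with
  | nil => simp [pvSplitAll]
  | cons c rest ih =>
      intro seg hseg
      simp only [pvSplitAll] at hseg
      by_cases hc : c = q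
      · rw [if_pos hc] at hseg
        rcases List.mem_cons.mp hseg with h | h
        · simp [h]
        · exact ih seg h
      · rw [if_neg hc] at hseg
        cases h : pvSplitAll q rest with
        | nil => exact absurd h (pvSplitAll_ne_nil q rest)
        | cons s t =>
            rw [h] at hseg
            simp only [pvConsHead, List.mem_cons] at hseg
            rcases hseg with h1 | h1
            · subst h1
              intro hmem
              rcases List.mem_cons.mp hmem with h2 | h2
              · exact hc h2.symm
              · exact ih s (by rw [h]; exact List.mem_cons_self ..) h2
            · exact ih seg (by rw [h]; exact List.mem_cons_of_mem _ h1)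


theorem pvSplitAll_recompose (q : Char) (cs : List Char) :
    ∀ s t, pvSplitAll q cs = s :: t → cs = s ++ t.flatMap (fun u => q :: u) := by
  induction cs with
  | nil => intro s t h; simp [pvSplitAll] at h; simp [h.1, h.2]
  | cons c rest ih =>
      intro s t h
      simp only [pvSplitAll] at h
      by_cases hc : c = q
      · rw [if_pos hc] at h
        cases h' : pvSplitAll q rest with
        | nil => exact absurd h' (pvSplitAll_ne_nil q rest)
        | cons s' t' =>
            rw [h'] at h
            injection h with hs ht
            subst hs; subst ht
            rw [hc, ih s' t' h']
            simp
      · rw [if_neg hc] at h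
        cases h' : pvSplitAll q rest with
        | nil => exact absurd h' (pvSplitAll_ne_nil q rest)
        | cons s' t' =>
            rw [h'] at h
            simp only [pvConsHead] at h
            injection h with hs ht
            subst hs; subst ht
            rw [ih s' t' h']
            simp
theorem pv_afold_noquote (seg : List Char) :
    ∀ (parts : List (List Char)) (cur : List Char), '"' ∉ seg →
    seg.foldl pvAStep (parts, cur, false)
      = (match pvSplitAll ',' seg with
         | [] => (parts, cur, false)
         | first :: rest =>
             let r := rest.foldl pvCommaFold (parts, cur ++ first)
             (r.1, r.2, false)) := by
  induction seg with
  | nil => intro parts cur _; simp [pvSplitAll]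
  | cons c rest ih =>
      intro parts cur hq
      have hcq : ¬ (c = '"') := fun h => hq (h ▸ List.mem_cons_self ..)
      have hrest : '"' ∉ rest := fun h => hq (List.mem_cons_of_mem _ h)
      by_cases hc : c = ','
      · subst hc
        have hstep : pvAStep (parts, cur, false) ',' = (parts ++ [cur], [], false) := by
          simp only [pvAStep]
          rw [if_neg (by decide), if_pos (by simp)]
        rw [List.foldl_cons, hstep, ih (parts ++ [cur]) [] hrest]
        rw [show pvSplitAll ',' (',' :: rest) = [] :: pvSplitAll ',' rest from by simp [pvSplitAll]]
        cases h : pvSplitAll ',' rest with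
        | nil => exact absurd h (pvSplitAll_ne_nil ',' rest)
        | cons s t => simp [pvCommaFold]
      · have hstep : pvAStep (parts, cur, false) c = (parts, cur ++ [c], false) := by
          simp only [pvAStep]
          rw [if_neg hcq, if_neg (fun hh => hc hh.1)]
        rw [List.foldl_cons, hstep, ih parts (cur ++ [c]) hrest]
        simp only [pvSplitAll, if_neg hc]
        cases h : pvSplitAll ',' rest with
        | nil => exact absurd h (pvSplitAll_ne_nil ',' rest)
        | cons s t => simp [pvConsHead, h]

-- A's loop on a quote-free segment, inside quotes: plain accumulation.
theorem pv_afold_quoted (seg : List Char) :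
    ∀ (parts : List (List Char)) (cur : List Char), '"' ∉ seg →
    seg.foldl pvAStep (parts, cur, true) = (parts, cur ++ seg, true) := by
  induction seg with
  | nil => intro parts cur _; simp
  | cons c rest ih =>
      intro parts cur hq
      have hcq : ¬ (c = '"') := fun h => hq (h ▸ List.mem_cons_self ..)
      have hrest : '"' ∉ rest := fun h => hq (List.mem_cons_of_mem _ h)
      have hstep : pvAStep (parts, cur, true) c = (parts, cur ++ [c], true) := by
        simp only [pvAStep]
        rw [if_neg hcq, if_neg (fun hh => by simpa using hh.2)]
      rw [List.foldl_cons, hstep, ih parts (cur ++ [c]) hrest]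
      simp


theorem pv_main (segs : List (List Char)) :
    ∀ (i : Nat) (parts : List (List Char)) (cur : List Char),
    1 ≤ i → (∀ s ∈ segs, '"' ∉ s) →
    (PySem.List.enumerate segs (i : Int)).foldl pvBSeg (parts, cur)
      = (((segs.flatMap (fun s => '"' :: s)).foldl pvAStep (parts, cur, decide (i % 2 = 0))).1,
         ((segs.flatMap (fun s => '"' :: s)).foldl pvAStep (parts, cur, decide (i % 2 = 0))).2.1) := by
  induction segs with
  | nil => intro i parts cur _ _; simp [PySem.List.enumerate]
  | cons seg rest ih =>
      intro i parts cur hi hfree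
      have hseg : '"' ∉ seg := hfree seg (List.mem_cons_self ..)
      have hrest : ∀ s ∈ rest, '"' ∉ s := fun s hs => hfree s (List.mem_cons_of_mem _ hs)
      rw [PySem.List.enumerate_cons, List.foldl_cons,
        show ((i : Int) + 1) = ((i + 1 : Nat) : Int) from by push_cast; ring]
      simp only [List.flatMap_cons, List.foldl_append, List.foldl_cons]
      by_cases hpar : i % 2 = 0
      · have hmod : PySem.Int.mod (i : Int) 2 = 0 := by
          simp only [PySem.Int.mod]
          rw [Int.fmod_eq_emod]
          omega
        have hne : (i : Int) ≠ 0 := by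
          have := Nat.one_le_iff_ne_zero.mp hi
          exact_mod_cast this
        have ha : pvAStep (parts, cur, decide (i % 2 = 0)) '"' = (parts, cur ++ ['"'], false) := by
          simp [pvAStep, hpar]
        rw [ha, pv_afold_noquote seg parts (cur ++ ['"']) hseg]
        cases h : pvSplitAll ',' seg with
        | nil => exact absurd h (pvSplitAll_ne_nil ',' seg)
        | cons first rst =>
            have hb : pvBSeg (parts, cur) ((i : Int), seg)
                = rst.foldl pvCommaFold (parts, (cur ++ ['"']) ++ first) := by
              simp only [pvBSeg, hmod, ne_eq, not_true_eq_false, if_false, if_pos hne]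
              rw [pv_splitOn, pv_consHead_nil _ (pvSplitAll_ne_nil ',' seg), h]
            rw [hb]
            have hd : decide ((i + 1) % 2 = 0) = false := by
              simp only [decide_eq_false_iff_not]
              omega
            have hih := ih (i + 1) (rst.foldl pvCommaFold (parts, (cur ++ ['"']) ++ first)).1
                (rst.foldl pvCommaFold (parts, (cur ++ ['"']) ++ first)).2 (by omega) hrest
            rw [hd] at hih
            simp only [Prod.mk.eta] at hih
            rw [hih]
      · have hmod : PySem.Int.mod (i : Int) 2 ≠ 0 := by
          simp only [PySem.Int.mod]
          rw [Int.fmod_eq_emod]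
          omega
        have ha : pvAStep (parts, cur, decide (i % 2 = 0)) '"' = (parts, cur ++ ['"'], true) := by
          simp [pvAStep, hpar]
        have hb : pvBSeg (parts, cur) ((i : Int), seg) = (parts, cur ++ '"' :: seg) := by
          simp only [pvBSeg]
          rw [if_pos (show PySem.Int.mod ((i : Int), seg).1 2 ≠ 0 from hmod)]
        rw [ha, pv_afold_quoted seg parts (cur ++ ['"']) hseg, hb]
        have hd : decide ((i + 1) % 2 = 0) = true := by
          simp only [decide_eq_true_eq]
          omega
        have hih := ih (i + 1) parts (cur ++ '"' :: seg) (by omega) hrest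
        rw [hd] at hih
        rw [hih]
        simp
theorem pvSplit1_pair (cs : List Char) (h : ':' ∈ cs) :
    ∃ a b, pvSplit1 ':' cs = [a, b] := by
  induction cs with
  | nil => simp at h
  | cons c rest ih =>
      by_cases hc : c = ':'
      · exact ⟨[], rest, by simp [pvSplit1, hc]⟩
      · have hr : ':' ∈ rest := by
          rcases List.mem_cons.mp h with h1 | h1
          · exact absurd h1.symm hc
          · exact h1
        obtain ⟨a, b, hab⟩ := ih hr
        exact ⟨c :: a, b, by simp [pvSplit1, hc, hab, pvConsHead]⟩

theorem pvEntry_eq : pvEntryA = pvEntryB := by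
  funext out part
  unfold pvEntryA pvEntryB
  cases h : PySem.Chars.isIn ['='] part <;> simp [h]

-- ===== VERDICT (by name: the statement is the Claim_ definition above) =====
theorem parse_attrs_py_spec : Claim_equal_parse_attrs_py := by
  unfold Claim_equal_parse_attrs_py
  intro line _ hpre
  unfold Spec_parse_attrs_py
  unfold Pre_parse_attrs_py at hpre
  have hmem : ':' ∈ line.toList := by
    have h1 : PySem.Chars.isIn [':'] line.toList = true := by
      simpa using hpre
    have h2 := (PySem.Chars.isIn_iff_infix [':'] line.toList).mp h1
    obtain ⟨s, t, hst⟩ := h2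
    rw [← hst]; simp
  obtain ⟨a, b, hab⟩ := pvSplit1_pair line.toList hmem
  have hsplit : PySem.Chars.splitOnMax line.toList [':'] 1 = [a, b] := by
    rw [pv_splitOnMax1, hab]
    simp [pvConsHead]
  unfold parse_attrs_py parse_attrs_py_alt
  rw [hsplit]
  have hget : PySem.List.pyGet? [a, b] (1 : Int) = some b := by
    simp [PySem.List.pyGet?, PySem.List.pyIdx?]
  rw [hget]
  simp only []
  -- both sides now process payload b
  cases hsegs : pvSplitAll '"' b with
  | nil => exact absurd hsegs (pvSplitAll_ne_nil '"' b)
  | cons s0 t =>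
      have hfree : ∀ s ∈ s0 :: t, '"' ∉ s := by
        rw [← hsegs]; exact pvSplitAll_free '"' b
      have hrec := pvSplitAll_recompose '"' b s0 t hsegs
      rw [pv_splitOn, pv_consHead_nil _ (pvSplitAll_ne_nil '"' b), hsegs]
      rw [PySem.List.enumerate_cons, List.foldl_cons]
      rw [hrec, List.foldl_append]
      rw [pv_afold_noquote s0 [] [] (hfree s0 (List.mem_cons_self ..))]
      cases h0 : pvSplitAll ',' s0 with
      | nil => exact absurd h0 (pvSplitAll_ne_nil ',' s0)
      | cons f r =>
          have hb0 : pvBSeg ([], []) ((0 : Int), s0) = r.foldl pvCommaFold ([], [] ++ f) := by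
            simp only [pvBSeg]
            rw [if_neg (show ¬ PySem.Int.mod ((0 : Int), s0).1 2 ≠ 0 from by
              simp [PySem.Int.mod])]
            simp only [show (((0 : Int), s0).1 ≠ 0) = False from by simp, if_false]
            rw [pv_splitOn, pv_consHead_nil _ (pvSplitAll_ne_nil ',' s0), h0]
          rw [hb0]
          simp only []
          have hmain := pv_main t 1 (r.foldl pvCommaFold ([], [] ++ f)).1
              (r.foldl pvCommaFold ([], [] ++ f)).2 (by norm_num)
              (fun s hs => hfree s (List.mem_cons_of_mem _ hs))
          rw [show decide (1 % 2 = 0) = false from by decide] at hmain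
          simp only [Prod.mk.eta] at hmain
          rw [show ((1 : Nat) : Int) = (1 : Int) from rfl] at hmain
          simp only [show (0 : Int) + 1 = (1 : Int) from by norm_num]
          rw [hmain, pvEntry_eq]
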